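-- pv_equiv track=rewrite | github.com/1ELM7/L1SN_Tlse3_PaulSabatier | L1SN_Theorie_information/tp3_ti.py | add_poly_recurs
-- ===== SOURCE A (Python) =====
-- def add_mod2(o,k):
--     return (o+k)%2
--
-- def add_poly(poly1,poly2):
--     poly = []
--     s,o = 0,0
--     long1 = len(poly1)
--     long2 = len(poly2)
--     while s!=long1 and o!=long2:
--         poly.append(add_mod2(poly1[s],poly2[o]))
--         s+=1
--         o+=1
--     if s==long1:
--         poly += poly2[o:]
--     else:
--         poly += poly1[s:]
--     return poly
--
-- def add_poly_recurs(poly):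
--     if len(poly)==2:
--         return add_poly(poly[0],poly[1])
--     elif len(poly)==1:
--         return poly
--     else:
--         poly[1]=add_poly(poly[0],poly[1])
--         return add_poly_recurs(poly[1:])
-- ===== SOURCE B (Python) =====
-- def _add2(p, q):
--     # XOR-add two polynomials: overlap summed mod 2, the longer tail copied as-is
--     if len(p) < len(q):
--         p, q = q, p
--     return [(p[i] + q[i]) % 2 if i < len(q) else p[i] for i in range(len(p))]
--
-- def add_poly_recurs(poly):
--     acc = poly[0]
--     for q in poly[1:]:
--         acc = _add2(acc, q)
--     return acc
-- ===== Notes on version B (the rewrite author's own statement) =====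
-- stated objective: simpler
-- what changed: Replaced A's recursion over list slices with in-place mutation by a flat left-fold accumulator loop, and replaced the hand-written two-pointer while-loop adder by a swap-to-longer indexed comprehension; B does not mutate its argument (equivalence is about the return value only).
-- outside the precondition, e.g. on add_poly_recurs([[1, 0]]): A returns [[1, 0]], B returns [1, 0]; on add_poly_recurs([]): A raises IndexError, B raises IndexError
import Mathlib
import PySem

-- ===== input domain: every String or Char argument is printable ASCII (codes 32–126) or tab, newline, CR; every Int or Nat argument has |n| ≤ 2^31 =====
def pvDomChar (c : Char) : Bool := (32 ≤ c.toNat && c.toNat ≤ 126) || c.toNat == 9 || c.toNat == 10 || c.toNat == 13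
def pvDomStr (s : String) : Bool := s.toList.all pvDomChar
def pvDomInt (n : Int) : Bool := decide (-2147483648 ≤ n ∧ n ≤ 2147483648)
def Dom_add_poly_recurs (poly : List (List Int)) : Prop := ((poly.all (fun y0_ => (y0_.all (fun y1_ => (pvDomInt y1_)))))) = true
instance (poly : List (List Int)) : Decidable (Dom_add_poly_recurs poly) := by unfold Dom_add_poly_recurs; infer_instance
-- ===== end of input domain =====

-- B replaces A's slice-recursion with in-place mutation by a flat left-fold accumulator loop and a
-- swap-to-longer indexed pairwise adder (objective: simpler). A mutates poly[1] for len ≥ 3; B does not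
-- mutate its argument: the equivalence proved here is about the RETURN value only.

-- ===== PORT A =====
def add_mod2 (o k : Int) : Int := PySem.Int.mod (o + k) 2

-- A's while-loop walks both lists in lockstep while both have elements, then appends the leftover slice.
def add_polyA : List Int → List Int → List Int
  | a :: t1, b :: t2 => add_mod2 a b :: add_polyA t1 t2
  | [], p2 => p2
  | p1, [] => p1

def add_poly_recurs : List (List Int) → List Int
  | [p0, p1] => add_polyA p0 p1
  | [_] => []          -- Python A returns poly itself (a list of lists, not a List Int); excluded by Pre_
  | [] => []           -- Python A raises IndexError here; excluded by Pre_
  | p0 :: p1 :: rest => add_poly_recurs (add_polyA p0 p1 :: rest)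
  termination_by poly => poly.length
  decreasing_by simp

-- ===== PORT B =====
-- Source B's _add2: conditional swap so p is the longer list, then one indexed comprehension.
def add2 (p q : List Int) : List Int :=
  let pq : List Int × List Int := if p.length < q.length then (q, p) else (p, q)
  (List.range pq.1.length).map (fun i =>
    if i < pq.2.length then PySem.Int.mod (pq.1.getD i 0 + pq.2.getD i 0) 2 else pq.1.getD i 0)

def add_poly_recurs_alt (poly : List (List Int)) : List Int :=
  match poly with
  | [] => []           -- Python B raises IndexError (poly[0]); excluded by Pre_
  | p :: rest => rest.foldl add2 p

-- ===== PRECONDITION & SPEC =====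
-- Pre_ excludes lists of length < 2: on [] A raises IndexError, and on a one-element list A returns
-- the argument list itself — a list of lists, not a value of the declared polynomial (List Int) type.
def Pre_add_poly_recurs (poly : List (List Int)) : Prop := 2 ≤ poly.length
instance (poly : List (List Int)) : Decidable (Pre_add_poly_recurs poly) := by unfold Pre_add_poly_recurs; infer_instance
def pvWitness_add_poly_recurs : List (List Int) := [[1, 0, 1], [0, 1]]

def Spec_add_poly_recurs (poly : List (List Int)) (out : List Int) : Prop := out = add_poly_recurs_alt poly
instance (poly : List (List Int)) (out : List Int) : Decidable (Spec_add_poly_recurs poly out) := by unfold Spec_add_poly_recurs; infer_instance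

-- ===== CLAIM (what is proved, stated in full; the proofs are below) =====
def Claim_equal_add_poly_recurs : Prop := ∀ (poly : List (List Int)), Dom_add_poly_recurs poly → Pre_add_poly_recurs poly → Spec_add_poly_recurs poly (add_poly_recurs poly)

-- ===== LEMMAS AND PROOFS =====

-- A's pairwise adder is commutative: the overlap uses (a+b) % 2 and the leftover is the longer tail.
theorem add_polyA_comm : ∀ p q : List Int, add_polyA p q = add_polyA q p := by
  intro p
  induction p with
  | nil => intro q; cases q <;> simp [add_polyA]
  | cons a t ih =>
    intro q
    cases q with
    | nil => simp [add_polyA]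
    | cons b s => simp [add_polyA, ih, add_mod2]; ring_nf

-- reading off a list by indices is the identity
theorem range_map_getD (p : List Int) :
    (List.range p.length).map (fun i => p.getD i 0) = p := by
  apply List.ext_getElem
  · simp
  · intro i h1 h2
    simp [List.getD_eq_getElem?_getD, h2]

-- B's comprehension (longer list first) computes A's lockstep adder.
theorem A_as_map : ∀ (p q : List Int), q.length ≤ p.length →
    (List.range p.length).map (fun i =>
      if i < q.length then PySem.Int.mod (p.getD i 0 + q.getD i 0) 2 else p.getD i 0)
    = add_polyA p q := by
  intro p
  induction p with
  | nil =>
    intro q hq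
    have : q = [] := List.eq_nil_of_length_eq_zero (Nat.le_zero.mp hq)
    subst this; simp [add_polyA]
  | cons a t ih =>
    intro q hq
    cases q with
    | nil =>
      simpa [add_polyA] using range_map_getD (a :: t)
    | cons b s =>
      have hs : s.length ≤ t.length := by simpa using hq
      have := ih s hs
      simp only [add_polyA, List.length_cons, List.range_succ_eq_map, List.map_cons,
        List.map_map]
      refine congrArg₂ List.cons ?_ ?_
      · simp [add_mod2]
      · rw [← this]
        apply List.map_congr_left
        intro i _
        simp

theorem add2_eq : add2 = add_polyA := by
  funext p q
  unfold add2
  by_cases h : p.length < q.length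
  · simp only [h, if_true]
    rw [A_as_map q p (Nat.le_of_lt h), add_polyA_comm]
  · simp only [h, if_false]
    exact A_as_map p q (Nat.le_of_not_lt h)

-- A's slice recursion is the left fold of its pairwise adder.
theorem recursA_foldl : ∀ (rest : List (List Int)) (p0 p1 : List Int),
    add_poly_recurs (p0 :: p1 :: rest) = rest.foldl add_polyA (add_polyA p0 p1) := by
  intro rest
  induction rest with
  | nil => intro p0 p1; rw [add_poly_recurs]; rfl
  | cons r rs ih =>
    intro p0 p1
    rw [show add_poly_recurs (p0 :: p1 :: r :: rs)
          = add_poly_recurs (add_polyA p0 p1 :: r :: rs) from by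
        rw [add_poly_recurs]; simp]
    rw [ih]
    simp [List.foldl]

-- ===== VERDICT (by name: the statement is the Claim_ definition above) =====
theorem add_poly_recurs_spec : Claim_equal_add_poly_recurs := by
  intro poly _ hpre
  unfold Spec_add_poly_recurs
  match poly with
  | [] => exact absurd hpre (by simp [Pre_add_poly_recurs])
  | [_] => exact absurd hpre (by simp [Pre_add_poly_recurs])
  | p0 :: p1 :: rest =>
    show add_poly_recurs (p0 :: p1 :: rest) = add_poly_recurs_alt (p0 :: p1 :: rest)
    rw [recursA_foldl]
    simp [add_poly_recurs_alt, add2_eq, List.foldl]
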